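-- pv_equiv track=rewrite | github.com/ambroseahawo/python | black-jack/black_jack.py | is_blackjack
-- ===== SOURCE A (Python) =====
-- import itertools
--
-- def is_blackjack(card_one, card_two):
--     """Determine if the hand is a 'natural' or 'blackjack'.
--
--     :param card_one, card_two: str - card dealt. See below for values.
--     :return: bool - is the hand is a blackjack (two cards worth 21).
--
--     1.  'J', 'Q', or 'K' (otherwise known as "face cards") = 10
--     2.  'A' (ace card) = 11 (if already in hand)
--     3.  '2' - '10' = numerical value.
--     """
--
--     # card_combinations = [('10', 'A'), ('A', '10'), ('K', 'A'), ('A', 'K'),('Q', 'A'), ('A', 'Q'), ('J', 'A'), ('A', 'J')]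
--
--     ten_card = ['10', 'K', 'Q', 'J']
--     permutations_list = []
--
--     for each_item in ten_card:
--         permutations_list.append(list(itertools.permutations([each_item, "A"])))
--
--     card_permutations = [item for sublist in permutations_list for item in sublist]
--
--     if (card_one, card_two) in card_permutations:
--         return True
--     else:
--         return False
-- ===== SOURCE B (Python) =====
-- TEN_CARDS = ('10', 'K', 'Q', 'J')
--
-- def is_blackjack(card_one, card_two):
--     return (card_one == 'A' and card_two in TEN_CARDS) or \
--            (card_two == 'A' and card_one in TEN_CARDS)
-- ===== Notes on version B (the rewrite author's own statement) =====
-- stated objective: simpler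
-- what changed: Replaces building a list of itertools.permutations pairs and searching it with a direct boolean test: one card is 'A' and the other is in the ten-value set.
import Mathlib
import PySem

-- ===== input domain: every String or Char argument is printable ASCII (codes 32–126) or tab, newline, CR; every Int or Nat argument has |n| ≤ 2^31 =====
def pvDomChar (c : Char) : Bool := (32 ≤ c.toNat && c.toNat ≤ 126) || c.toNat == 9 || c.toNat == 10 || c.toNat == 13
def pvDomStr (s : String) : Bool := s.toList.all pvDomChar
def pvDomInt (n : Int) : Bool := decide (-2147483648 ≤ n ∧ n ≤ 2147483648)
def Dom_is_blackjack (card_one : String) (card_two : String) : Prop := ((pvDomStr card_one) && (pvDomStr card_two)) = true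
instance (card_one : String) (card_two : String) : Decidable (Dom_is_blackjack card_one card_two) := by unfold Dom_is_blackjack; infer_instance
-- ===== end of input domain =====

-- B replaces A's build-a-permutation-table-and-search with a direct two-role boolean test (objective: simpler).

-- ===== PORT A =====
-- itertools.permutations([x, "A"]) for the two-element list: exactly [(x,"A"), ("A",x)]
def pvPerms2 (x : String) : List (String × String) := [(x, "A"), ("A", x)]

def is_blackjack (card_one : String) (card_two : String) : Bool :=
  let ten_card : List String := ["10", "K", "Q", "J"]
  let permutations_list : List (List (String × String)) :=
    ten_card.foldl (fun acc each_item => acc ++ [pvPerms2 each_item]) []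
  let card_permutations : List (String × String) :=
    permutations_list.foldl (fun acc sublist => acc ++ sublist) []
  if (card_one, card_two) ∈ card_permutations then true else false

-- ===== PORT B =====
def pvTenCards : List String := ["10", "K", "Q", "J"]

def is_blackjack_alt (card_one : String) (card_two : String) : Bool :=
  (card_one == "A" && pvTenCards.contains card_two) ||
  (card_two == "A" && pvTenCards.contains card_one)

-- ===== PRECONDITION & SPEC =====
def Spec_is_blackjack (card_one : String) (card_two : String) (out : Bool) : Prop := out = is_blackjack_alt card_one card_two
instance (card_one : String) (card_two : String) (out : Bool) : Decidable (Spec_is_blackjack card_one card_two out) := by unfold Spec_is_blackjack; infer_instance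

-- ===== CLAIM (what is proved, stated in full; the proofs are below) =====
def Claim_equal_is_blackjack : Prop := ∀ (card_one : String) (card_two : String), Dom_is_blackjack card_one card_two → Spec_is_blackjack card_one card_two (is_blackjack card_one card_two)

-- ===== LEMMAS AND PROOFS =====

-- ===== VERDICT (by name: the statement is the Claim_ definition above) =====
theorem is_blackjack_spec : Claim_equal_is_blackjack := by
  intro c1 c2 _
  unfold Spec_is_blackjack is_blackjack is_blackjack_alt pvPerms2 pvTenCards
  simp only [List.foldl, List.nil_append, List.cons_append, List.contains_eq_mem,
    List.mem_cons, List.not_mem_nil, or_false, Prod.mk.injEq]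
  by_cases h1 : c1 = "A" <;> by_cases h2 : c2 = "A" <;> simp [h1, h2]
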